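-- pv_equiv track=rewrite | github.com/BBR2394/AdventOfCode2K24 | day_09/main.py | get_index_last_contigous_int
-- ===== SOURCE A (Python) =====
-- def get_index_last_contigous_int(line):
--     i = 0
--     index_last_int = 0
--     while i < len(line):
--         if line[i] != '.':
--             index_last_int = i
--         i += 1
--     return index_last_int
-- ===== SOURCE B (Python) =====
-- def get_index_last_contigous_int(line):
--     n = len(line)
--     while n > 0 and line[n - 1] == '.':
--         n -= 1
--     return n - 1 if n > 0 else 0
-- ===== Notes on version B (the rewrite author's own statement) =====
-- stated objective: faster
-- what changed: Replaces the full forward scan that records the last non-dot index with a backward scan that only drops trailing dots, returning len-1 of the stripped prefix (0 when everything is a dot).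
import Mathlib
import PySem

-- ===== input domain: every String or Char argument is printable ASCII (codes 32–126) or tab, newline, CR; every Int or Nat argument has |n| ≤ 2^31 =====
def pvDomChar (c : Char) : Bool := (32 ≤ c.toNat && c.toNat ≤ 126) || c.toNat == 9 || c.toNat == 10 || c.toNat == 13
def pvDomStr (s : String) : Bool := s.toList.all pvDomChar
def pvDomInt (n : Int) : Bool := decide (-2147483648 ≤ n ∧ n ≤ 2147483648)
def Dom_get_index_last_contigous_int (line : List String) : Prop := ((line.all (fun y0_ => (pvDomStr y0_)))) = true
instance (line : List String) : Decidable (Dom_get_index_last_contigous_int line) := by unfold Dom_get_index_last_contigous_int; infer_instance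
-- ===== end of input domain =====

-- B replaces A's forward scan (last non-dot index seen) by a backward scan dropping trailing dots; return value only, no mutation.

-- ===== PORT A =====
-- the while loop: i counts up from 0, index_last_int records the latest non-dot index
def pvGoA (xs : List String) (i : Nat) (acc : Int) : Int :=
  if h : i < xs.length then
    pvGoA xs (i + 1) (if xs[i] ≠ "." then (i : Int) else acc)
  else acc
termination_by xs.length - i

def get_index_last_contigous_int (line : List String) : Int :=
  pvGoA line 0 0

-- ===== PORT B =====
-- the while loop: n counts down while line[n-1] == '.' (index n-1 is in range by the loop guard, so getD is exact)
def pvGoB (xs : List String) : Nat → Nat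
  | 0 => 0
  | n + 1 => if xs.getD n "" = "." then pvGoB xs n else n + 1

def get_index_last_contigous_int_alt (line : List String) : Int :=
  let n := pvGoB line line.length
  if n > 0 then (n : Int) - 1 else 0

-- ===== PRECONDITION & SPEC =====
def Spec_get_index_last_contigous_int (line : List String) (out : Int) : Prop := out = get_index_last_contigous_int_alt line
instance (line : List String) (out : Int) : Decidable (Spec_get_index_last_contigous_int line out) := by unfold Spec_get_index_last_contigous_int; infer_instance

-- ===== CLAIM (what is proved, stated in full; the proofs are below) =====
def Claim_equal_get_index_last_contigous_int : Prop := ∀ (line : List String), Dom_get_index_last_contigous_int line → Spec_get_index_last_contigous_int line (get_index_last_contigous_int line)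

-- ===== LEMMAS AND PROOFS =====

-- A's result over the prefix of length n (forward loop unrolled from the right)
def pvR (xs : List String) : Nat → Int
  | 0 => 0
  | n + 1 => if xs.getD n "" ≠ "." then (n : Int) else pvR xs n

-- A's tail recursion from index i with accumulator pvR xs i yields the full prefix fold
lemma pvGoA_eq_pvR (xs : List String) :
    ∀ k i, i + k = xs.length → pvGoA xs i (pvR xs i) = pvR xs xs.length := by
  intro k
  induction k with
  | zero =>
      intro i hi
      have h : i = xs.length := by omega
      subst h
      rw [pvGoA, dif_neg (by omega)]
  | succ k ih =>
      intro i hi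
      have hlt : i < xs.length := by omega
      rw [pvGoA, dif_pos hlt]
      have hstep : (if xs[i] ≠ "." then (i : Int) else pvR xs i) = pvR xs (i + 1) := by
        rw [pvR, xs.getD_eq_getElem "" hlt]
      rw [hstep]
      exact ih (i + 1) (by omega)

-- prefix fold = B's closed formula on the backward-scan result
lemma pvR_eq_B (xs : List String) :
    ∀ n, pvR xs n = (if pvGoB xs n > 0 then ((pvGoB xs n : Int)) - 1 else 0) := by
  intro n
  induction n with
  | zero => rfl
  | succ n ih =>
      rw [pvR, pvGoB]
      by_cases h : xs[n]?.getD "" = "."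
      · simp [List.getD, h, ih]
      · simp [List.getD, h]

-- ===== VERDICT (by name: the statement is the Claim_ definition above) =====
theorem get_index_last_contigous_int_spec : Claim_equal_get_index_last_contigous_int := by
  intro line _
  unfold Spec_get_index_last_contigous_int get_index_last_contigous_int get_index_last_contigous_int_alt
  have hA : pvGoA line 0 0 = pvR line line.length :=
    pvGoA_eq_pvR line line.length 0 (by omega)
  rw [hA, pvR_eq_B]
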